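-- pv_equiv track=rewrite | github.com/intuitionofmind/tnpy | Fermi_TN-measure/fermiT/tools.py | gen_gidx
-- ===== SOURCE A (Python) =====
-- def gen_gidx(ndim, parity=0):
--     """Grassmann index generator (of given parity)"""
--     if not parity % 1 == 0:
--         raise ValueError('`parity` must be an integer')
--     parity %= 2
--     if ndim == 0:
--         if parity != 0:
--             raise ValueError('scalar must be parity even')
--         yield tuple()
--         return
--     for i in range(2**ndim):
--         binary = bin(i)[2:].rjust(ndim, '0')
--         if binary.count('1') % 2 == parity:
--             yield tuple(int(j) for j in binary)
-- ===== SOURCE B (Python) =====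
-- def gen_gidx(ndim, parity=0):
--     """Grassmann index generator (of given parity)"""
--     if not parity % 1 == 0:
--         raise ValueError('`parity` must be an integer')
--     parity %= 2
--     if ndim == 0:
--         if parity != 0:
--             raise ValueError('scalar must be parity even')
--         yield tuple()
--         return
--
--     def rec(n, p):
--         # all length-n binary tuples with bit-sum parity p, in increasing
--         # binary order: 0-prefixed tuples first, then 1-prefixed ones
--         if n == 0:
--             if p == 0:
--                 yield tuple()
--             return
--         for rest in rec(n - 1, p):
--             yield (0,) + rest
--         for rest in rec(n - 1, (1 + p) % 2):
--             yield (1,) + rest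
--
--     yield from rec(ndim, parity)
-- ===== Notes on version B (the rewrite author's own statement) =====
-- stated objective: alternative
-- what changed: Replaces the scan over all 2**ndim integers with binary-string formatting and popcount filtering by a recursive generator that builds only the tuples of the requested parity, splitting on the leading bit (0-prefixed results before 1-prefixed ones preserves the increasing order).
import Mathlib
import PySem

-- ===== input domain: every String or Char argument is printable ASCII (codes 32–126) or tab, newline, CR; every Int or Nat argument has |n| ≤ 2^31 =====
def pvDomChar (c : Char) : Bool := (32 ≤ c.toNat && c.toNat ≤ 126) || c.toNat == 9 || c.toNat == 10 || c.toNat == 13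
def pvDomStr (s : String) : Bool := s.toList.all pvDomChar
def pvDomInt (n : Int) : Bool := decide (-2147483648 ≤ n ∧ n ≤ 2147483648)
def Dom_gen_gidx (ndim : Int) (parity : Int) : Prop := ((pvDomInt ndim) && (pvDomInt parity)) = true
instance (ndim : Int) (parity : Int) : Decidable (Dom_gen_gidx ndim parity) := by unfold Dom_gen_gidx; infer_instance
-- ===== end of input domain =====

-- B replaces A's scan over all 2^ndim integers (binary-string formatting + popcount filter)
-- by a recursive generator splitting on the leading bit; objective: alternative algorithm.


-- ===== PORT A =====
-- bin(m)[2:] for m > 0: repeated //2, %2, most-significant digit first (exact for m ≥ 0)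
def pvBinGo (m : Nat) : List Int :=
  if h : m = 0 then [] else pvBinGo (m / 2) ++ [((m % 2 : Nat) : Int)]
decreasing_by exact Nat.div_lt_self (Nat.pos_of_ne_zero h) (by norm_num)

-- bin(i)[2:] as the list of its digits (bin(0)[2:] = "0")
def pvBin (i : Nat) : List Int := if i = 0 then [0] else pvBinGo i

-- s.rjust(n, '0') on a digit list
def pvRjust (l : List Int) (n : Nat) : List Int := List.replicate (n - l.length) 0 ++ l

def gen_gidx (ndim : Int) (parity : Int) : List (List Int) :=
  -- `parity % 1 == 0` always holds for an int `parity`, so A's first raise never fires on Dom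
  let p := PySem.Int.mod parity 2
  if ndim == 0 then
    if p != 0 then []          -- ValueError('scalar must be parity even'): excluded by Pre_
    else [[]]
  else
    -- for i in range(2**ndim): … (ndim < 0 raises TypeError in Python: excluded by Pre_;
    -- i.toNat is exact since range elements are nonnegative)
    (PySem.List.pyRange 0 ((2 : Int) ^ ndim.toNat) 1).foldl
      (fun acc i =>
        let b := pvRjust (pvBin i.toNat) ndim.toNat
        if (((b.count 1) % 2 : Nat) : Int) == p then acc ++ [b] else acc) []

-- ===== PORT B =====
-- inner recursive generator rec(n, p) of Source B
def pvRec : Nat → Int → List (List Int)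
  | 0, p => if p == 0 then [[]] else []
  | n + 1, p =>
      (pvRec n p).map (fun rest => 0 :: rest) ++
      (pvRec n (PySem.Int.mod (1 + p) 2)).map (fun rest => 1 :: rest)

def gen_gidx_alt (ndim : Int) (parity : Int) : List (List Int) :=
  let p := PySem.Int.mod parity 2
  if ndim == 0 then
    if p != 0 then []          -- ValueError: excluded by Pre_
    else [[]]
  else pvRec ndim.toNat p

-- ===== PRECONDITION & SPEC =====
-- Pre_ excludes ndim < 0 (A raises TypeError on range(2**ndim)) and the scalar case
-- ndim = 0 with odd parity (A raises ValueError). A is total everywhere else on Dom.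
def Pre_gen_gidx (ndim : Int) (parity : Int) : Prop :=
  0 ≤ ndim ∧ (ndim = 0 → PySem.Int.mod parity 2 = 0)
instance (ndim : Int) (parity : Int) : Decidable (Pre_gen_gidx ndim parity) := by
  unfold Pre_gen_gidx; infer_instance

def pvWitness_gen_gidx : Int × Int := (2, 1)

def Spec_gen_gidx (ndim : Int) (parity : Int) (out : List (List Int)) : Prop := out = gen_gidx_alt ndim parity
instance (ndim : Int) (parity : Int) (out : List (List Int)) : Decidable (Spec_gen_gidx ndim parity out) := by unfold Spec_gen_gidx; infer_instance

-- ===== CLAIM (what is proved, stated in full; the proofs are below) =====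
def Claim_equal_gen_gidx : Prop := ∀ (ndim : Int) (parity : Int), Dom_gen_gidx ndim parity → Pre_gen_gidx ndim parity → Spec_gen_gidx ndim parity (gen_gidx ndim parity)

-- ===== LEMMAS AND PROOFS =====

-- the length-n binary representation of j (MSB first), the common normal form of both sides
def pvBits : Nat → Nat → List Int
  | 0, _ => []
  | n + 1, j => pvBits n (j / 2) ++ [((j % 2 : Nat) : Int)]

theorem pvBinGo_eq (m : Nat) :
    pvBinGo m = if m = 0 then [] else pvBinGo (m / 2) ++ [((m % 2 : Nat) : Int)] := by
  rw [pvBinGo]; split <;> rfl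

theorem pvBits_zero (n : Nat) : pvBits n 0 = List.replicate n 0 := by
  induction n with
  | zero => rfl
  | succ n ih => simp [pvBits, ih, List.replicate_succ']

theorem pvBits_lt {n j : Nat} (h : j < 2 ^ n) : pvBits (n + 1) j = 0 :: pvBits n j := by
  induction n generalizing j with
  | zero =>
      interval_cases j
      simp [pvBits]
  | succ n ih =>
      have h2 : j / 2 < 2 ^ n := by
        have : (2:Nat) ^ (n+1) = 2 * 2 ^ n := by ring
        omega
      show pvBits (n + 1) (j / 2) ++ _ = _
      rw [ih h2]
      rfl

theorem pvBits_high {n j : Nat} (h : j < 2 ^ n) :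
    pvBits (n + 1) (2 ^ n + j) = 1 :: pvBits n j := by
  induction n generalizing j with
  | zero =>
      interval_cases j
      simp [pvBits]
  | succ n ih =>
      have hp : (2:Nat) ^ (n+1) = 2 * 2 ^ n := by ring
      have hdiv : (2 ^ (n+1) + j) / 2 = 2 ^ n + j / 2 := by omega
      have hmod : (2 ^ (n+1) + j) % 2 = j % 2 := by omega
      have h2 : j / 2 < 2 ^ n := by omega
      show pvBits (n + 1) ((2 ^ (n+1) + j) / 2) ++ [(((2 ^ (n+1) + j) % 2 : Nat) : Int)] = _
      rw [hdiv, hmod, ih h2]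
      rfl

theorem pvRjust_snoc (l : List Int) (c : Int) (m : Nat) :
    pvRjust (l ++ [c]) (m + 1) = pvRjust l m ++ [c] := by
  simp [pvRjust]

theorem pvRjust_bin {n j : Nat} (hn : 1 ≤ n) (h : j < 2 ^ n) :
    pvRjust (pvBin j) n = pvBits n j := by
  induction n generalizing j with
  | zero => omega
  | succ n ih =>
      match j, h with
      | 0, _ =>
          simp [pvBin, pvRjust, pvBits_zero, List.replicate_succ']
      | 1, _ =>
          have hb1 : pvBin 1 = [1] := by simp [pvBin, pvBinGo_eq]
          rw [hb1]
          show pvRjust [1] (n + 1) = pvBits n (1 / 2) ++ [((1 % 2 : Nat) : Int)]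
          simp [pvRjust, pvBits_zero]
      | (j+2), h =>
          have hj2 : (j + 2) / 2 ≥ 1 := by omega
          have hn1 : 1 ≤ n := by
            by_contra hc
            interval_cases n <;> omega
          have h2 : (j + 2) / 2 < 2 ^ n := by
            have : (2:Nat) ^ (n+1) = 2 * 2 ^ n := by ring
            omega
          have hbin : pvBin (j + 2) = pvBinGo ((j+2)/2) ++ [(((j+2) % 2 : Nat) : Int)] := by
            rw [pvBin, if_neg (by omega), pvBinGo_eq, if_neg (by omega)]
          have hbin2 : pvBin ((j+2)/2) = pvBinGo ((j+2)/2) := by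
            rw [pvBin, if_neg (by omega)]
          rw [hbin, pvRjust_snoc, ← hbin2, ih hn1 h2]
          rfl

theorem pvToggle_mem (p : Int) (hp : p = 0 ∨ p = 1) :
    PySem.Int.mod (1 + p) 2 = 0 ∨ PySem.Int.mod (1 + p) 2 = 1 := by
  rcases hp with rfl | rfl
  · right; decide
  · left; decide

-- the filtered enumeration of length-n bitstrings equals B's recursive generator
theorem pvMain (n : Nat) (p : Int) (hp : p = 0 ∨ p = 1) :
    ((List.range (2 ^ n)).filter
        (fun j => (((pvBits n j).count 1 % 2 : Nat) : Int) == p)).map (pvBits n)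
      = pvRec n p := by
  induction n generalizing p with
  | zero =>
      rcases hp with rfl | rfl <;> simp [pvBits, pvRec]
  | succ n ih =>
      have hsplit : (2:Nat) ^ (n+1) = 2 ^ n + 2 ^ n := by ring
      rw [hsplit, List.range_add, List.filter_append, List.map_append]
      congr 1
      · -- low half: leading bit 0
        have hfilt : ∀ j ∈ List.range (2 ^ n),
            ((((pvBits (n+1) j).count 1 % 2 : Nat) : Int) == p)
              = ((((pvBits n j).count 1 % 2 : Nat) : Int) == p) := by
          intro j hj
          rw [pvBits_lt (List.mem_range.mp hj)]
          simp
        rw [List.filter_congr hfilt]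
        have hmap : ∀ j ∈ (List.range (2 ^ n)).filter
            (fun j => (((pvBits n j).count 1 % 2 : Nat) : Int) == p),
            pvBits (n+1) j = ((fun l => (0:Int) :: l) ∘ pvBits n) j := by
          intro j hj
          exact pvBits_lt (List.mem_range.mp (List.mem_of_mem_filter hj))
        rw [List.map_congr_left hmap, ← List.map_map, ih p hp]
      · -- high half: leading bit 1
        rw [List.filter_map, List.map_map]
        have hfilt : ∀ j ∈ List.range (2 ^ n),
            (((fun j => (((pvBits (n+1) j).count 1 % 2 : Nat) : Int) == p) ∘ (fun k => 2 ^ n + k)) j)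
              = ((((pvBits n j).count 1 % 2 : Nat) : Int) == PySem.Int.mod (1 + p) 2) := by
          intro j hj
          show ((((pvBits (n+1) (2 ^ n + j)).count 1 % 2 : Nat) : Int) == p) = _
          rw [pvBits_high (List.mem_range.mp hj)]
          simp only [List.count_cons, beq_self_eq_true, if_true, PySem.Int.mod]
          rcases hp with rfl | rfl
          · rw [show ((1:Int) + 0).fmod 2 = 1 from by decide, Bool.eq_iff_iff]
            simp only [beq_iff_eq]
            omega
          · rw [show ((1:Int) + 1).fmod 2 = 0 from by decide, Bool.eq_iff_iff]
            simp only [beq_iff_eq]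
            omega
        rw [List.filter_congr hfilt]
        have hmap : ∀ j ∈ (List.range (2 ^ n)).filter
            (fun j => (((pvBits n j).count 1 % 2 : Nat) : Int) == PySem.Int.mod (1 + p) 2),
            ((pvBits (n+1)) ∘ (fun k => 2 ^ n + k)) j = ((fun l => (1:Int) :: l) ∘ pvBits n) j := by
          intro j hj
          exact pvBits_high (List.mem_range.mp (List.mem_of_mem_filter hj))
        rw [List.map_congr_left hmap, ← List.map_map, ih _ (pvToggle_mem p hp)]

-- ===== VERDICT (by name: the statement is the Claim_ definition above) =====
theorem gen_gidx_spec : Claim_equal_gen_gidx := by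
  intro ndim parity _ hpre
  obtain ⟨hnd, hsc⟩ := hpre
  unfold Spec_gen_gidx gen_gidx gen_gidx_alt
  by_cases h0 : ndim = 0
  · simp [h0]
  · have hpos : 0 < ndim := lt_of_le_of_ne hnd (Ne.symm h0)
    have hN : 1 ≤ ndim.toNat := by omega
    set N := ndim.toNat with hNdef
    have hbeq : (ndim == 0) = false := by simp [h0]
    rw [hbeq]
    simp only [Bool.false_eq_true, if_false]
    have hp : PySem.Int.mod parity 2 = 0 ∨ PySem.Int.mod parity 2 = 1 := by
      have h1 := PySem.Int.mod_nonneg parity (by norm_num : (0:Int) < 2)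
      have h2 := PySem.Int.mod_lt parity (by norm_num : (0:Int) < 2)
      omega
    set p := PySem.Int.mod parity 2 with hpdef
    -- range(2**ndim) as List.range
    have hcast : ((2 : Int) ^ N) = ((2 ^ N : Nat) : Int) := by push_cast; ring
    have hrange : PySem.List.pyRange 0 ((2 : Int) ^ N) 1
        = List.map (fun k : Nat => (k : Int)) (List.range (2 ^ N)) := by
      rw [PySem.List.pyRange_one]
      simp only [sub_zero, hcast, Int.toNat_natCast, zero_add]
    rw [hrange, List.foldl_map]
    rw [PySem.List.foldl_append_if
      (fun k : Nat => (((pvRjust (pvBin ((k : Int)).toNat) N).count 1 % 2 : Nat) : Int) == p)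
      (fun k : Nat => pvRjust (pvBin ((k : Int)).toNat) N)]
    simp only [Int.toNat_natCast, List.nil_append]
    have hfilt : ∀ j ∈ List.range (2 ^ N),
        ((((pvRjust (pvBin j) N).count 1 % 2 : Nat) : Int) == p)
          = ((((pvBits N j).count 1 % 2 : Nat) : Int) == p) := by
      intro j hj
      rw [pvRjust_bin hN (List.mem_range.mp hj)]
    rw [List.filter_congr hfilt]
    have hmap : ∀ j ∈ (List.range (2 ^ N)).filter
        (fun j => (((pvBits N j).count 1 % 2 : Nat) : Int) == p),
        pvRjust (pvBin j) N = pvBits N j := by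
      intro j hj
      exact pvRjust_bin hN (List.mem_range.mp (List.mem_of_mem_filter hj))
    rw [List.map_congr_left hmap]
    exact pvMain N p hp
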